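-- pv_equiv track=rewrite | github.com/coutego/advent-of-code-2022 | src/aoc22.py | sum_top_n
-- ===== SOURCE A (Python) =====
-- from typing import Callable, List, Tuple, Optional, Any
--
-- def sum_top_n(n: int, nums: List[int]) -> int:
--     ret = 0
--     snums = set(nums)
--     for i in range(n):
--         m = max(snums)
--         ret += m
--         snums.remove(m)
--     return ret
-- ===== SOURCE B (Python) =====
-- def sum_top_n(n, nums):
--     return sum(sorted(set(nums), reverse=True)[:max(n, 0)])
-- ===== Notes on version B (the rewrite author's own statement) =====
-- stated objective: faster
-- what changed: Replaces A's repeated max-and-remove loop over the set (n passes) with one descending sort of the distinct values followed by summing a prefix slice.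
import Mathlib
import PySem

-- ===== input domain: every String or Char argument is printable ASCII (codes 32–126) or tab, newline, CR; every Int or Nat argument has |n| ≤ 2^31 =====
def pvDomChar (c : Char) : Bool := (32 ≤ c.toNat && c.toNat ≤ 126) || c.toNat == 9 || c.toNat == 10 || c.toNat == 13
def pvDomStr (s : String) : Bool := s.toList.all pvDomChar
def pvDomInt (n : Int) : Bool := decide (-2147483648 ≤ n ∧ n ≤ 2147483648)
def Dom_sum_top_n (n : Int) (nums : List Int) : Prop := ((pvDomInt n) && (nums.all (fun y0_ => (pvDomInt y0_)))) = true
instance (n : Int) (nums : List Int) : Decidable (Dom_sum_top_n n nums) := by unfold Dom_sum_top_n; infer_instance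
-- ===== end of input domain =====

-- B replaces A's n-pass max-and-remove loop with one descending sort of the distinct values and a prefix sum (asymptotically faster).


-- ===== PORT A =====
-- one iteration of A's loop body: m = max(snums); ret += m; snums.remove(m)
-- (none = the state after Python has raised; Pre_ keeps the loop away from it)
def pvStepA (st : Option (Int × PySem.Set Int)) : Option (Int × PySem.Set Int) :=
  match st with
  | none => none
  | some (ret, snums) =>
    match PySem.List.max? snums (fun x => x) with
    | none => none            -- max(snums) on an empty set: ValueError
    | some m =>
      match PySem.Set.remove? snums m with
      | none => none          -- snums.remove(m): KeyError (never fires: m ∈ snums)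
      | some s' => some (ret + m, s')

def sum_top_n (n : Int) (nums : List Int) : Int :=
  match (PySem.List.pyRange 0 n 1).foldl (fun st _ => pvStepA st)
      (some ((0 : Int), PySem.Set.ofList nums)) with
  | some (ret, _) => ret
  | none => 0

-- ===== PORT B =====
def sum_top_n_alt (n : Int) (nums : List Int) : Int :=
  (PySem.List.slice (PySem.List.sorted (PySem.Set.ofList nums) (fun x => x) true)
    none (some (max n 0))).sum

-- ===== PRECONDITION & SPEC =====
-- A raises ValueError when it must take the max of an emptied set, i.e. when n exceeds
-- the number of distinct values; Pre_ excludes exactly those inputs.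
def Pre_sum_top_n (n : Int) (nums : List Int) : Prop :=
  n ≤ ((PySem.Set.ofList nums).length : Int)
instance (n : Int) (nums : List Int) : Decidable (Pre_sum_top_n n nums) := by
  unfold Pre_sum_top_n; infer_instance
def pvWitness_sum_top_n : Int × List Int := (2, [5, 1, 5, 3])

def Spec_sum_top_n (n : Int) (nums : List Int) (out : Int) : Prop := out = sum_top_n_alt n nums
instance (n : Int) (nums : List Int) (out : Int) : Decidable (Spec_sum_top_n n nums out) := by unfold Spec_sum_top_n; infer_instance

-- ===== CLAIM (what is proved, stated in full; the proofs are below) =====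
def Claim_equal_sum_top_n : Prop := ∀ (n : Int) (nums : List Int), Dom_sum_top_n n nums → Pre_sum_top_n n nums → Spec_sum_top_n n nums (sum_top_n n nums)

-- ===== LEMMAS AND PROOFS =====

-- a foldl that ignores the list elements is function iteration
theorem pv_foldl_const_iterate {α β : Type} (g : α → α) (l : List β) (init : α) :
    l.foldl (fun st _ => g st) init = g^[l.length] init := by
  induction l generalizing init with
  | nil => rfl
  | cons h t ih => simp [List.foldl, ih, Function.iterate_succ_apply]

theorem pv_pyRange_length (n : Int) (h : 0 ≤ n) :
    (PySem.List.pyRange 0 n 1).length = n.toNat := by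
  simp [PySem.List.pyRange]
  omega

theorem pv_discard_perm (s : List Int) (m : Int) (hnd : s.Nodup) (hm : m ∈ s) :
    (m :: PySem.Set.discard s m).Perm s := by
  have h1 : PySem.Set.discard s m = s.erase m := by
    rw [List.Nodup.erase_eq_filter hnd]
    simp [PySem.Set.discard, bne]
  rw [h1]
  exact (List.perm_cons_erase hm).symm

-- descending sort of a nodup list starts with its max, then the descending sort of the rest
theorem pv_sorted_desc_cons (s : List Int) (m : Int) (hnd : s.Nodup)
    (hm : PySem.List.max? s (fun x => x) = some m) :
    PySem.List.sorted s (fun x => x) true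
      = m :: PySem.List.sorted (PySem.Set.discard s m) (fun x => x) true := by
  have hmem : m ∈ s := PySem.List.max?_mem hm
  have hperm : (PySem.Set.discard s m).Perm (s.erase m) := by
    rw [List.Nodup.erase_eq_filter hnd]
    simp [PySem.Set.discard, bne]
  apply PySem.List.sorted_rev_eq_of_perm_of_pairwise_gt
  · exact (List.Perm.cons m (PySem.List.sorted_perm _ _ _)).trans (pv_discard_perm s m hnd hmem)
  · constructor
    · intro y hy
      have hyd : y ∈ PySem.Set.discard s m := (PySem.List.mem_sorted _ _ _ _).1 hy
      have hys : y ∈ s := by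
        have := hperm.mem_iff.1 hyd
        exact List.mem_of_mem_erase this
      have hyne : y ≠ m := by
        simp [PySem.Set.discard, List.mem_filter] at hyd
        exact hyd.2
      exact lt_of_le_of_ne (PySem.List.max?_isMax hm y hys) hyne
    · have h1 : (PySem.List.sorted (PySem.Set.discard s m) (fun x => x) true).Pairwise
          (fun a b => b ≤ a) := PySem.List.sorted_pairwise_rev _ _
      have h2 : (PySem.List.sorted (PySem.Set.discard s m) (fun x => x) true).Nodup :=
        (PySem.List.sorted_perm _ _ _).symm.nodup (List.Nodup.filter _ hnd)
      exact (h1.and h2).imp (fun h => lt_of_le_of_ne h.1 (Ne.symm h.2))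

theorem pv_discard_length (s : List Int) (m : Int) (hnd : s.Nodup) (hm : m ∈ s) :
    (PySem.Set.discard s m).length + 1 = s.length := by
  have := (pv_discard_perm s m hnd hm).length_eq
  simpa using this

-- the loop invariant: k iterations of A's body accumulate the k largest distinct values
theorem pv_loop_spec (k : Nat) : ∀ (s : List Int) (r : Int), s.Nodup → k ≤ s.length →
    ∃ s', pvStepA^[k] (some (r, s))
      = some (r + ((PySem.List.sorted s (fun x => x) true).take k).sum, s') := by
  induction k with
  | zero => intro s r _ _; exact ⟨s, by simp⟩
  | succ k ih =>
    intro s r hnd hk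
    have hne : s ≠ [] := by intro h; subst h; simp at hk
    obtain ⟨m, hm⟩ : ∃ m, PySem.List.max? s (fun x => x) = some m := by
      cases h : PySem.List.max? s (fun x => x) with
      | none => exact absurd ((PySem.List.max?_eq_none_iff _ _).1 h) hne
      | some m => exact ⟨m, rfl⟩
    have hmem : m ∈ s := PySem.List.max?_mem hm
    have hstep : pvStepA (some (r, s)) = some (r + m, PySem.Set.discard s m) := by
      simp [pvStepA, hm, PySem.Set.remove?, PySem.Set.contains,  hmem]
    have hlen : k ≤ (PySem.Set.discard s m).length := by
      have := pv_discard_length s m hnd hmem; omega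
    have hnd' : (PySem.Set.discard s m).Nodup := List.Nodup.filter _ hnd
    obtain ⟨s', hs'⟩ := ih (PySem.Set.discard s m) (r + m) hnd' hlen
    refine ⟨s', ?_⟩
    rw [Function.iterate_succ_apply, hstep, hs', pv_sorted_desc_cons s m hnd hm]
    simp [List.take_succ_cons]
    ring_nf

-- ===== VERDICT (by name: the statement is the Claim_ definition above) =====
theorem sum_top_n_spec : Claim_equal_sum_top_n := by
  intro n nums _ hpre
  unfold Spec_sum_top_n sum_top_n sum_top_n_alt
  by_cases hn : 0 ≤ n
  · have hmax : max n 0 = n := by omega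
    rw [hmax, PySem.List.slice_to _ hn,
      pv_foldl_const_iterate pvStepA (PySem.List.pyRange 0 n 1), pv_pyRange_length n hn]
    have hk : n.toNat ≤ (PySem.Set.ofList nums).length := by
      unfold Pre_sum_top_n at hpre; omega
    obtain ⟨s', hs'⟩ := pv_loop_spec n.toNat (PySem.Set.ofList nums) 0
      (PySem.Set.nodup_ofList nums) hk
    rw [hs']
    simp
  · have hr : PySem.List.pyRange 0 n 1 = [] := by
      simp [PySem.List.pyRange]; omega
    have hmax : max n 0 = 0 := by omega
    rw [hr, hmax, PySem.List.slice_to _ (by omega : (0:Int) ≤ 0)]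
    simp
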